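-- pv_equiv track=rewrite | github.com/Kalki767/Leetcode_Contests | Weekly_Contest_462/Maximum_K_to_Sort_a_Permutation.py | sortPermutation
-- ===== SOURCE A (Python) =====
-- from typing import List
--
-- def sortPermutation(nums: List[int]) -> int:
--     '''Approach: Bitwise AND. The problem asks to find the maximum k such that
--     two elements can be swapped when their and result is equal to k and we can
--     sort the input. Here let's look at the problem a little closer. The first
--     useful thing that we have is the array is a permutation from 0 to n-1 which
--     means from this we can know the final position of each element by matching
--     it with the index. Another clue is if an element is already in it's final
--     position there is no need to swap it with any element to sort the array.
--     Now if the index and the value at that index doesn't match that means a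
--     different value is there that needs to be swapped. We can swap it with the
--     correct value if and only if we find the and result of the index and value
--     and take that as a k. But what if we have multiple elements which are not in
--     their final position? that means we are going to have multiple k's but we
--     need only one k so we need to take the and of all those k's. Why would this
--     work? Instead of swapping with the direct element at the required position
--     we can also swap them with another element and continue swapping as long as
--     the condition is satisfied and the array is not sorted. Because there is no
--     restriction on the number of swap that can be made.'''
--
--     ans = float('inf')
--     for i in range(len(nums)):
--         if nums[i] == i:
--             continue
--         bitwise_and = nums[i] & i
--         if ans == float('inf'):
--             ans = bitwise_and
--         else:
--             ans = ans & bitwise_and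
--
--     return ans if ans != float('inf') else 0
-- ===== SOURCE B (Python) =====
-- from typing import List
--
-- def sortPermutation(nums: List[int]) -> int:
--     # Two-stage bit-reconstruction: collect the misplaced (index, value) pairs,
--     # then build the answer bit by bit -- bit b is set iff every misplaced pair
--     # has bit b set in both its index and its value.  Correct because bit b of
--     # AND over pairs of (v & i) is 1 exactly when all those i and v have bit b.
--     # Indices are < len(nums), so no bit at or above len(nums).bit_length()
--     # can survive the AND, which bounds the bit loop.
--     mis = [(i, v) for i, v in enumerate(nums) if v != i]
--     if not mis:
--         return 0
--     ans = 0
--     for b in range(len(nums).bit_length()):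
--         if all((i >> b) & 1 == 1 and (v >> b) & 1 == 1 for i, v in mis):
--             ans |= 1 << b
--     return ans
-- ===== Notes on version B (the rewrite author's own statement) =====
-- stated objective: alternative
-- what changed: A folds nums[i]&i into a float('inf')-sentinel accumulator in one pass; B first collects the misplaced (index, value) pairs and then reconstructs the answer bit by bit, setting bit b iff every misplaced pair has bit b set in both index and value (correct since bit b of an AND is the conjunction of bit b over the operands, and indices < len(nums) bound the useful bits).
import Mathlib
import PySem

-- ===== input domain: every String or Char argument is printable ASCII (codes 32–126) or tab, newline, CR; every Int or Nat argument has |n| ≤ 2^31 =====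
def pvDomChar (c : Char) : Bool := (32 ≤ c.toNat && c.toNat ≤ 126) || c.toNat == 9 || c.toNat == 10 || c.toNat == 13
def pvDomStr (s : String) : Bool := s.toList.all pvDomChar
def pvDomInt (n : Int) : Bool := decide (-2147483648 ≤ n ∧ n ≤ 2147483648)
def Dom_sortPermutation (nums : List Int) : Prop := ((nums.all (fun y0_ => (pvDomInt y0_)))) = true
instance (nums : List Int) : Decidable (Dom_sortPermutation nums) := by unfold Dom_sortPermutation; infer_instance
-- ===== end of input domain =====

-- B replaces A's single AND-fold with a float('inf') sentinel by a two-stage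
-- bit-reconstruction: first collect the misplaced (index, value) pairs, then build the
-- answer bit by bit (bit b is set iff every misplaced pair has bit b in both components);
-- objective: alternative algorithm, not claimed faster.

-- ===== PORT A =====
def sortPermutation (nums : List Int) : Int :=
  -- ans = float('inf') is modelled as `none`; every i of range(len(nums)) is in range,
  -- so pyGetD is exact for nums[i]
  let ans : Option Int :=
    (PySem.List.pyRange 0 (PySem.List.len nums) 1).foldl
      (fun (ans : Option Int) i =>
        if PySem.List.pyGetD nums i 0 = i then ans
        else
          let bitwise_and := PySem.Int.band (PySem.List.pyGetD nums i 0) i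
          match ans with
          | none => some bitwise_and
          | some a => some (PySem.Int.band a bitwise_and))
      none
  match ans with
  | some a => a
  | none => 0

-- ===== PORT B =====
-- B-side helpers: mis = [(i, v) for i, v in enumerate(nums) if v != i], and the body of
-- the bit loop. (i >> b) & 1 == 1 is ported as PySem.Int.band (p.1 >>> b.toNat) 1 = 1:
-- the loop variable b of range(bit_length) is nonnegative, and Lean's Int >>> with a Nat
-- shift amount is Python's >> (arithmetic shift); 1 << b is 1 <<< b.toNat.
def pvMisfits (nums : List Int) : List (Int × Int) :=
  (PySem.List.enumerate nums).filter (fun p => decide (p.2 ≠ p.1))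

def pvBitStep (mis : List (Int × Int)) (ans : Int) (b : Int) : Int :=
  if mis.all (fun p =>
      decide (PySem.Int.band (p.1 >>> b.toNat) 1 = 1) &&
      decide (PySem.Int.band (p.2 >>> b.toNat) 1 = 1))
  then PySem.Int.bor ans (1 <<< b.toNat) else ans

def sortPermutation_alt (nums : List Int) : Int :=
  let mis := pvMisfits nums
  if mis = [] then 0
  else
    (PySem.List.pyRange 0 (PySem.Int.bitLength (PySem.List.len nums)) 1).foldl
      (pvBitStep mis) 0

-- ===== PRECONDITION & SPEC =====
def Spec_sortPermutation (nums : List Int) (out : Int) : Prop := out = sortPermutation_alt nums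
instance (nums : List Int) (out : Int) : Decidable (Spec_sortPermutation nums out) := by unfold Spec_sortPermutation; infer_instance

-- ===== CLAIM (what is proved, stated in full; the proofs are below) =====
def Claim_equal_sortPermutation : Prop := ∀ (nums : List Int), Dom_sortPermutation nums → Spec_sortPermutation nums (sortPermutation nums)

-- ===== LEMMAS AND PROOFS =====

theorem pv_land_add_ldiff (m : Nat) : ∀ n : Nat, (m &&& n) + Nat.ldiff m n = m := by
  induction m using Nat.binaryRec with
  | zero => intro n; simp [Nat.ldiff]
  | bit b m ih =>
    intro n
    induction n using Nat.bitCasesOn with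
    | bit c n =>
      rw [Nat.land_bit, Nat.ldiff_bit, Nat.bit_val, Nat.bit_val, Nat.bit_val]
      have := ih n
      cases b <;> cases c <;> simp at this ⊢ <;> omega

theorem pv_band_eq_land (a b : Int) : PySem.Int.band a b = Int.land a b := by
  rcases a with m | m <;> rcases b with n | n
  · simp [PySem.Int.band, Int.land]
  · have h1 : ¬ (0 : Int) ≤ Int.negSucc n := by simp [Int.negSucc_eq]; omega
    have h2 : (-(Int.negSucc n) - 1) = (n : Int) := by simp [Int.negSucc_eq]
    have h3 : (m &&& n) + Nat.ldiff m n = m := pv_land_add_ldiff m n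
    simp [PySem.Int.band, h1, Int.land]
    omega
  · have h1 : ¬ (0 : Int) ≤ Int.negSucc m := by simp [Int.negSucc_eq]; omega
    have h2 : (-(Int.negSucc m) - 1) = (m : Int) := by simp [Int.negSucc_eq]
    have h3 : (n &&& m) + Nat.ldiff n m = n := pv_land_add_ldiff n m
    simp [PySem.Int.band, h1, Int.land]
    omega
  · have h1 : ¬ (0 : Int) ≤ Int.negSucc m := by simp [Int.negSucc_eq]; omega
    have h1' : ¬ (0 : Int) ≤ Int.negSucc n := by simp [Int.negSucc_eq]; omega
    have h2 : (-(Int.negSucc m) - 1) = (m : Int) := by simp [Int.negSucc_eq]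
    have h2' : (-(Int.negSucc n) - 1) = (n : Int) := by simp [Int.negSucc_eq]
    simp only [PySem.Int.band, if_neg h1, if_neg h1', h2, h2', Int.toNat_natCast]
    simp [Int.land, Int.negSucc_eq]
    ring

theorem pv_testBit_band (a b : Int) (k : Nat) :
    (PySem.Int.band a b).testBit k = (a.testBit k && b.testBit k) := by
  rw [pv_band_eq_land]; exact Int.testBit_land a b k

theorem pv_int_eq_of_testBit_eq (a b : Int) (h : ∀ k, a.testBit k = b.testBit k) : a = b := by
  rcases a with m | m <;> rcases b with n | n
  · exact congrArg Int.ofNat (Nat.eq_of_testBit_eq fun i => by simpa [Int.testBit] using h i)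
  · exfalso
    have hk := h (max m n)
    have hm : Nat.testBit m (max m n) = false :=
      Nat.testBit_lt_two_pow (lt_of_lt_of_le (Nat.lt_two_pow_self)
        (Nat.pow_le_pow_right (by norm_num) (le_max_left m n)))
    have hn : Nat.testBit n (max m n) = false :=
      Nat.testBit_lt_two_pow (lt_of_lt_of_le (Nat.lt_two_pow_self)
        (Nat.pow_le_pow_right (by norm_num) (le_max_right m n)))
    simp [Int.testBit, hm, hn] at hk
  · exfalso
    have hk := h (max m n)
    have hm : Nat.testBit m (max m n) = false :=
      Nat.testBit_lt_two_pow (lt_of_lt_of_le (Nat.lt_two_pow_self)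
        (Nat.pow_le_pow_right (by norm_num) (le_max_left m n)))
    have hn : Nat.testBit n (max m n) = false :=
      Nat.testBit_lt_two_pow (lt_of_lt_of_le (Nat.lt_two_pow_self)
        (Nat.pow_le_pow_right (by norm_num) (le_max_right m n)))
    simp [Int.testBit, hm, hn] at hk
  · exact congrArg Int.negSucc (Nat.eq_of_testBit_eq fun i => by
      have := h i; simpa [Int.testBit] using this)

-- the bit test of B's loop body: (x >> k) & 1 == 1 is exactly testBit
theorem pv_shift_band_one (x : Int) (k : Nat) :
    (PySem.Int.band (x >>> k) 1 = 1) ↔ x.testBit k := by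
  rw [PySem.Int.band_one, PySem.Int.mod_eq_emod_of_pos (by norm_num)]
  rcases x with m | m
  · have h1 : Int.ofNat m >>> k = ((m >>> k : Nat) : Int) := rfl
    have h2 : Int.testBit (Int.ofNat m) k = Nat.testBit m k := rfl
    rw [h1, h2, Nat.testBit_eq_decide_div_mod_eq, ← Nat.shiftRight_eq_div_pow]
    generalize m >>> k = t
    rcases Nat.mod_two_eq_zero_or_one t with h4 | h4 <;> simp [h4] <;> omega
  · have h1 : Int.negSucc m >>> k = Int.negSucc (m >>> k) := rfl
    have h2 : Int.testBit (Int.negSucc m) k = !Nat.testBit m k := rfl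
    have h3 : Int.negSucc (m >>> k) = -((m >>> k : Nat) : Int) - 1 := by
      rw [Int.negSucc_eq]; ring
    rw [h1, h2, Nat.testBit_eq_decide_div_mod_eq, ← Nat.shiftRight_eq_div_pow, h3]
    generalize m >>> k = t
    rcases Nat.mod_two_eq_zero_or_one t with h4 | h4 <;> simp [h4] <;> omega

theorem pv_bor_nonneg (a b : Int) (ha : 0 ≤ a) (hb : 0 ≤ b) : 0 ≤ PySem.Int.bor a b := by
  simp only [PySem.Int.bor, if_pos ha, if_pos hb]
  exact Int.natCast_nonneg _

theorem pv_testBit_bor (a b : Int) (ha : 0 ≤ a) (hb : 0 ≤ b) (k : Nat) :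
    (PySem.Int.bor a b).testBit k = (a.testBit k || b.testBit k) := by
  simp only [PySem.Int.bor, if_pos ha, if_pos hb]
  have h1 : Int.testBit ((a.toNat ||| b.toNat : Nat) : Int) k
      = Nat.testBit (a.toNat ||| b.toNat) k := rfl
  rw [h1, Nat.testBit_or]
  have ha' : a.testBit k = a.toNat.testBit k := by
    conv_lhs => rw [← Int.toNat_of_nonneg ha]
    rfl
  have hb' : b.testBit k = b.toNat.testBit k := by
    conv_lhs => rw [← Int.toNat_of_nonneg hb]
    rfl
  rw [ha', hb']

theorem pv_one_shift_nonneg (b : Nat) : 0 ≤ (((1 <<< b : Nat) : Int)) :=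
  Int.natCast_nonneg _

theorem pv_testBit_one_shift (b j : Nat) :
    (((1 <<< b : Nat) : Int)).testBit j = decide (j = b) := by
  have h2 : Int.testBit ((1 <<< b : Nat) : Int) j = Nat.testBit (1 <<< b) j := rfl
  rw [h2, Nat.shiftLeft_eq, one_mul, Nat.testBit_two_pow]
  simp [eq_comm]

-- named copies of A's loop body, over indices and over (index, value) pairs
def pvStepA (nums : List Int) (ans : Option Int) (i : Int) : Option Int :=
  if PySem.List.pyGetD nums i 0 = i then ans
  else
    let bitwise_and := PySem.Int.band (PySem.List.pyGetD nums i 0) i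
    match ans with
    | none => some bitwise_and
    | some a => some (PySem.Int.band a bitwise_and)

def pvStepA' (ans : Option Int) (p : Int × Int) : Option Int :=
  match ans with
  | none => some (PySem.Int.band p.2 p.1)
  | some a => some (PySem.Int.band a (PySem.Int.band p.2 p.1))

-- the bit predicate both characterizations share
def pvAllBit (mis : List (Int × Int)) (k : Nat) : Bool :=
  mis.all (fun p => p.2.testBit k && p.1.testBit k)

-- skipping in-place elements is filtering them out before the fold
theorem pv_if_filter (l : List (Int × Int)) : ∀ o : Option Int,
    l.foldl (fun ans p => if p.2 = p.1 then ans else pvStepA' ans p) o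
      = (l.filter (fun p => decide (p.2 ≠ p.1))).foldl pvStepA' o := by
  induction l with
  | nil => intro o; rfl
  | cons p l ih =>
    intro o
    by_cases h : p.2 = p.1 <;> simp [h, ih]

-- A's loop over indices is the A'-fold over the misplaced (index, value) pairs
theorem pv_A_filter (nums : List Int) :
    (PySem.List.pyRange 0 (PySem.List.len nums) 1).foldl (pvStepA nums) none =
      (pvMisfits nums).foldl pvStepA' none := by
  unfold pvMisfits
  rw [← pv_if_filter, PySem.List.enumerate_eq_map_pyRange nums 0, List.foldl_map]
  rfl

-- the A'-fold from a `some` seed is a plain AND-fold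
theorem pv_A'_some (l : List (Int × Int)) : ∀ a : Int,
    l.foldl pvStepA' (some a) =
      some (l.foldl (fun a p => PySem.Int.band a (PySem.Int.band p.2 p.1)) a) := by
  induction l with
  | nil => intro a; rfl
  | cons p l ih =>
    intro a
    simp only [List.foldl_cons]
    exact ih _

-- bit characterization of the AND-fold
theorem pv_A_testBit (l : List (Int × Int)) : ∀ (a : Int) (k : Nat),
    (l.foldl (fun a p => PySem.Int.band a (PySem.Int.band p.2 p.1)) a).testBit k =
      (a.testBit k && pvAllBit l k) := by
  induction l with
  | nil => intro a k; simp [pvAllBit]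
  | cons p l ih =>
    intro a k
    simp only [List.foldl_cons]
    rw [ih]
    simp [pvAllBit, pv_testBit_band, Bool.and_assoc]

theorem pv_bitStep_nonneg (mis : List (Int × Int)) (r : Int) (b : Int) (hr : 0 ≤ r) :
    0 ≤ pvBitStep mis r b := by
  unfold pvBitStep
  split
  · exact pv_bor_nonneg _ _ hr (pv_one_shift_nonneg _)
  · exact hr

theorem pv_B_nonneg (mis : List (Int × Int)) (W : Nat) :
    0 ≤ (PySem.List.pyRange 0 (W : Int) 1).foldl (pvBitStep mis) 0 := by
  induction W with
  | zero => simp [PySem.List.pyRange_one_eq_nil]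
  | succ W ih =>
    have hc : ((W + 1 : Nat) : Int) = (W : Int) + 1 := by push_cast; ring
    rw [hc, PySem.List.pyRange_one_succ_right (by positivity), List.foldl_append]
    simp only [List.foldl_cons, List.foldl_nil]
    exact pv_bitStep_nonneg _ _ _ ih

-- the Boolean condition of B's loop body at bit W is exactly pvAllBit
theorem pv_cond_eq (mis : List (Int × Int)) (W : Nat) :
    (mis.all (fun p =>
        decide (PySem.Int.band (p.1 >>> W) 1 = 1) &&
        decide (PySem.Int.band (p.2 >>> W) 1 = 1))) = pvAllBit mis W := by
  unfold pvAllBit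
  have hfun : (fun p : Int × Int =>
      decide (PySem.Int.band (p.1 >>> W) 1 = 1) &&
      decide (PySem.Int.band (p.2 >>> W) 1 = 1))
      = (fun p : Int × Int => p.2.testBit W && p.1.testBit W) := by
    funext p
    rw [Bool.and_comm]
    congr 1 <;> simp [pv_shift_band_one]
  rw [hfun]

-- bit characterization of B's reconstruction loop
theorem pv_B_testBit (mis : List (Int × Int)) (W : Nat) (k : Nat) :
    ((PySem.List.pyRange 0 (W : Int) 1).foldl (pvBitStep mis) 0).testBit k =
      (decide (k < W) && pvAllBit mis k) := by
  induction W with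
  | zero =>
    have hz : Int.testBit 0 k = false := by
      rw [show Int.testBit 0 k = Nat.testBit 0 k from rfl, Nat.zero_testBit]
    simp [PySem.List.pyRange_one_eq_nil, hz]
  | succ W ih =>
    have hc : ((W + 1 : Nat) : Int) = (W : Int) + 1 := by push_cast; ring
    rw [hc, PySem.List.pyRange_one_succ_right (by positivity), List.foldl_append]
    simp only [List.foldl_cons, List.foldl_nil]
    have hstep : ∀ r : Int, pvBitStep mis r (W : Int)
        = if pvAllBit mis W = true then PySem.Int.bor r ((1 <<< W : Nat) : Int) else r := by
      intro r
      unfold pvBitStep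
      rw [Int.toNat_natCast, pv_cond_eq]
    rw [hstep]
    by_cases hc' : pvAllBit mis W = true
    · rw [if_pos hc',
        pv_testBit_bor _ _ (pv_B_nonneg mis W) (pv_one_shift_nonneg W) k,
        ih, pv_testBit_one_shift]
      by_cases hk : k = W
      · subst hk
        simp [hc']
      · have h1 : decide (k = W) = false := by simp [hk]
        have h2 : decide (k < W + 1) = decide (k < W) := by
          by_cases h : k < W
          · have h' : k < W + 1 := by omega
            simp [h, h']
          · have h' : ¬ k < W + 1 := by omega
            simp [h, h']
        rw [h1, h2]
        simp
    · rw [if_neg hc', ih]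
      have hc'' : pvAllBit mis W = false := by
        cases h : pvAllBit mis W
        · rfl
        · exact absurd h hc'
      by_cases hk : k = W
      · subst hk
        simp [hc'']
      · have h2 : decide (k < W + 1) = decide (k < W) := by
          by_cases h : k < W
          · have h' : k < W + 1 := by omega
            simp [h, h']
          · have h' : ¬ k < W + 1 := by omega
            simp [h, h']
        rw [h2]

-- indices produced by enumerate are the positions
theorem pv_enum_fst (nums : List Int) (p : Int × Int) (hp : p ∈ PySem.List.enumerate nums) :
    0 ≤ p.1 ∧ p.1 < (nums.length : Int) := by
  have h1 : p.1 ∈ (PySem.List.enumerate nums).map (·.1) := List.mem_map_of_mem hp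
  rw [PySem.List.map_fst_enumerate] at h1
  rw [PySem.List.mem_pyRange_one] at h1
  omega

-- an index below the list length has no bit at or above bitLength(len)
theorem pv_idx_bit_false (nums : List Int) (i : Int) (h0 : 0 ≤ i) (h1 : i < (nums.length : Int))
    (k : Nat) (hk : PySem.Int.bitLength (PySem.List.len nums) ≤ k) : i.testBit k = false := by
  have h2 : i = ((i.toNat : Nat) : Int) := (Int.toNat_of_nonneg h0).symm
  rw [h2, show Int.testBit ((i.toNat : Nat) : Int) k = Nat.testBit i.toNat k from rfl]
  apply Nat.testBit_lt_two_pow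
  have h4 : (PySem.List.len nums).natAbs < 2 ^ PySem.Int.bitLength (PySem.List.len nums) :=
    PySem.Int.lt_two_pow_bitLength _
  have h5 : PySem.List.len nums = (nums.length : Int) := by simp [pysem]
  have h6 : (PySem.List.len nums).natAbs = nums.length := by rw [h5]; simp
  have h7 : i.toNat < nums.length := by omega
  calc i.toNat < nums.length := h7
    _ < 2 ^ PySem.Int.bitLength (PySem.List.len nums) := by omega
    _ ≤ 2 ^ k := Nat.pow_le_pow_right (by norm_num) hk

-- ===== VERDICT (by name: the statement is the Claim_ definition above) =====
theorem sortPermutation_spec : Claim_equal_sortPermutation := by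
  intro nums _
  show sortPermutation nums = sortPermutation_alt nums
  have hA : sortPermutation nums =
      (match (pvMisfits nums).foldl pvStepA' none with
        | some a => a
        | none => 0) := by
    simp only [sortPermutation]
    rw [show (fun (ans : Option Int) (i : Int) =>
        if PySem.List.pyGetD nums i 0 = i then ans
        else
          match ans with
          | none => some (PySem.Int.band (PySem.List.pyGetD nums i 0) i)
          | some a => some (PySem.Int.band a (PySem.Int.band (PySem.List.pyGetD nums i 0) i)))
      = pvStepA nums from rfl]
    rw [pv_A_filter]
  have hB : sortPermutation_alt nums =
      (if pvMisfits nums = [] then 0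
       else (PySem.List.pyRange 0
          ((PySem.Int.bitLength (PySem.List.len nums) : Nat) : Int) 1).foldl
         (pvBitStep (pvMisfits nums)) 0) := rfl
  rw [hA, hB]
  by_cases h : pvMisfits nums = []
  · rw [h]
    simp
  · rw [if_neg h]
    obtain ⟨q, rest, hqr⟩ := List.exists_cons_of_ne_nil h
    rw [hqr]
    simp only [List.foldl_cons]
    rw [show pvStepA' none q = some (PySem.Int.band q.2 q.1) from rfl, pv_A'_some]
    apply pv_int_eq_of_testBit_eq
    intro k
    rw [pv_A_testBit, pv_B_testBit]
    have hAll : ((PySem.Int.band q.2 q.1).testBit k && pvAllBit rest k)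
        = pvAllBit (q :: rest) k := by
      simp [pvAllBit, pv_testBit_band, Bool.and_assoc, Bool.and_comm]
    rw [hAll]
    by_cases hk : k < PySem.Int.bitLength (PySem.List.len nums)
    · rw [decide_eq_true hk]
      simp
    · have hd : decide (k < PySem.Int.bitLength (PySem.List.len nums)) = false :=
        decide_eq_false hk
      rw [hd]
      have hqmem : q ∈ PySem.List.enumerate nums := by
        have hqm : q ∈ pvMisfits nums := by rw [hqr]; exact List.mem_cons_self
        exact List.mem_of_mem_filter hqm
      obtain ⟨hq0, hqlt⟩ := pv_enum_fst nums q hqmem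
      have hlen : PySem.List.len nums = ((nums.length : Nat) : Int) := by simp [pysem]
      have hk2 : PySem.Int.bitLength ((nums.length : Nat) : Int) ≤ k := by
        rw [← hlen]
        omega
      have hbit : q.1.testBit k = false :=
        pv_idx_bit_false nums q.1 hq0 hqlt k hk2
      have hfalse : pvAllBit (q :: rest) k = false := by
        simp [pvAllBit, hbit]
      rw [hfalse]
      simp
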